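-- pv_equiv track=rewrite | github.com/ozet-team/ozet-server | utils/django/cache_framework/manager.py | parse_prefetch_fields
-- ===== SOURCE A (Python) =====
-- def parse_prefetch_fields(prefetch_fields):
--     if not prefetch_fields:
--         return {}
--
--     fields = {}
--     for field in prefetch_fields:
--         if '__' in field:
--             continue
--         fields[field] = []
--
--     for field in prefetch_fields:
--         if '__' not in field:
--             continue
--         separated_names = field.split('__')
--         if not separated_names:
--             continue
--         target_field = separated_names[0]
--         related_field = '__'.join(separated_names[1:])
--         if target_field not in fields or related_field in fields[target_field]:
--             continue
--         fields[target_field].append(related_field)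
--     return fields
-- ===== SOURCE B (Python) =====
-- def parse_prefetch_fields(prefetch_fields):
--     # Ordered distinct top-level keys, then one per-key scan collecting
--     # order-preserving deduped related sub-fields.
--     keys = dict.fromkeys(f for f in prefetch_fields if '__' not in f)
--     return {
--         k: list(dict.fromkeys(
--             '__'.join(parts[1:])
--             for parts in (f.split('__') for f in prefetch_fields if '__' in f)
--             if parts[0] == k))
--         for k in keys
--     }
-- ===== Notes on version B (the rewrite author's own statement) =====
-- stated objective: alternative
-- what changed: A builds the result with two sequential passes over the whole list mutating one dict (seed keys, then append deduped suffixes); B first computes the ordered-dedup list of top-level keys and then does an independent per-key scan, collecting each key's related sub-fields with an order-preserving dedup.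
import Mathlib
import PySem

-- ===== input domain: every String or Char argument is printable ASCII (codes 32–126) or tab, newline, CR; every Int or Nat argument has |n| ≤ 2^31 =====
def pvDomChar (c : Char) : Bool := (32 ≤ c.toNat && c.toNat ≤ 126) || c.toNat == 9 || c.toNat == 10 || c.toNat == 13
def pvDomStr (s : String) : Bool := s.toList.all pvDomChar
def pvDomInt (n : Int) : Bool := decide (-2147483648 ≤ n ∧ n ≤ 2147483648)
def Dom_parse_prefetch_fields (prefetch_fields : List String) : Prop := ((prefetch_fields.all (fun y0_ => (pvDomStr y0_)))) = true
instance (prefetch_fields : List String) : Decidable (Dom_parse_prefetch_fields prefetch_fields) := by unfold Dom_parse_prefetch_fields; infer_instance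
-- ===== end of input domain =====

-- B replaces A's two sequential dict-building passes by an ordered dedup of the top-level
-- keys followed by one per-key scan collecting the deduped related sub-fields (objective: alternative).

-- ===== PORT A =====
-- body of A's second loop (named helper; a literal transliteration of the loop body)
def pvStepA (d : PySem.Dict String (List String)) (field : String) : PySem.Dict String (List String) :=
  if PySem.Str.isIn "__" field then
    match PySem.Str.split? field "__" with
    | none => d            -- unreachable: the separator "__" is non-empty
    | some [] => d         -- 'if not separated_names: continue' (never fires: split is non-empty)
    | some (target :: rest) =>
      let related := PySem.Str.join "__" rest
      if !d.contains target || (d.getD target []).contains related then d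
      else d.modify target [] (fun v => v ++ [related])   -- fields[target].append(related); getD is safe: contains holds here
  else d

def parse_prefetch_fields (prefetch_fields : List String) : List (String × List String) :=
  if prefetch_fields = [] then []
  else
    let fields1 : PySem.Dict String (List String) :=
      prefetch_fields.foldl (fun d field =>
        if PySem.Str.isIn "__" field then d else d.insert field []) PySem.Dict.empty
    let fields2 := prefetch_fields.foldl pvStepA fields1
    fields2.items

-- ===== PORT B =====
def parse_prefetch_fields_alt (prefetch_fields : List String) : List (String × List String) :=
  let keys := PySem.List.dedup (prefetch_fields.filter (fun f => !PySem.Str.isIn "__" f))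
  let partsList := (prefetch_fields.filter (fun f => PySem.Str.isIn "__" f)).map
      (fun f => (PySem.Str.split? f "__").getD [])   -- f.split('__'); never none (the separator is non-empty)
  keys.map (fun k =>
    (k, PySem.List.dedup
          ((partsList.filter (fun parts => PySem.List.pyGetD parts 0 "" == k)).map
            (fun parts => PySem.Str.join "__" (PySem.List.slice parts (some 1) none)))))
  -- parts[0]: split('__') is never empty, so pyGetD's default is unreachable

-- ===== PRECONDITION & SPEC =====
def Spec_parse_prefetch_fields (prefetch_fields : List String) (out : List (String × List String)) : Prop := out = parse_prefetch_fields_alt prefetch_fields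
instance (prefetch_fields : List String) (out : List (String × List String)) : Decidable (Spec_parse_prefetch_fields prefetch_fields out) := by unfold Spec_parse_prefetch_fields; infer_instance

-- ===== CLAIM (what is proved, stated in full; the proofs are below) =====
def Claim_equal_parse_prefetch_fields : Prop := ∀ (prefetch_fields : List String), Dom_parse_prefetch_fields prefetch_fields → Spec_parse_prefetch_fields prefetch_fields (parse_prefetch_fields prefetch_fields)

-- ===== LEMMAS AND PROOFS =====

-- splitOn.go never returns []
theorem pv_go_ne_nil (sep : List Char) : ∀ (fuel : Nat) (s cur : List Char) (acc : List (List Char)), PySem.Chars.splitOn.go sep fuel s cur acc ≠ [] := by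
  intro fuel
  induction fuel with
  | zero => intro s cur acc; simp [PySem.Chars.splitOn.go]
  | succ n ih =>
    intro s cur acc
    cases s with
    | nil => simp [PySem.Chars.splitOn.go]
    | cons c rest =>
      rw [PySem.Chars.splitOn.go]
      split
      · exact ih _ _ _
      · exact ih _ _ _

theorem pv_splitOn_ne_nil (s sep : List Char) : PySem.Chars.splitOn s sep ≠ [] := by
  unfold PySem.Chars.splitOn; exact pv_go_ne_nil _ _ _ _ _

-- f.split('__') is some non-empty list
theorem pv_split_cons (f : String) : ∃ t ps, PySem.Str.split? f "__" = some (t :: ps) := by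
  have h := pv_splitOn_ne_nil f.toList ['_','_']
  cases hs : PySem.Chars.splitOn f.toList ['_','_'] with
  | nil => exact absurd hs h
  | cons c cs =>
    refine ⟨String.ofList c, cs.map String.ofList, ?_⟩
    simp [PySem.Str.split?, PySem.Chars.split?, hs]

-- the related sub-fields A's second loop appends under key k, given the sub-fields 'seen' already stored
def pvCollect (k : String) (seen : List String) : List String → List String
  | [] => []
  | f :: rest =>
    match PySem.Str.split? f "__" with
    | some (t :: ps) =>
      let r := PySem.Str.join "__" ps
      if PySem.Str.isIn "__" f && t == k && !seen.contains r
      then r :: pvCollect k (seen ++ [r]) rest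
      else pvCollect k seen rest
    | _ => pvCollect k seen rest

-- B's per-key inner list (before dedup)
def pvInner (k : String) (l : List String) : List String :=
  (((l.filter (fun f => PySem.Str.isIn "__" f)).map (fun f => (PySem.Str.split? f "__").getD [])).filter
      (fun parts => PySem.List.pyGetD parts 0 "" == k)).map
    (fun parts => PySem.Str.join "__" (PySem.List.slice parts (some 1) none))

theorem pvCollect_skip_notin (k f : String) (seen rest : List String)
    (hin : ¬ PySem.Str.isIn "__" f = true) :
    pvCollect k seen (f :: rest) = pvCollect k seen rest := by
  obtain ⟨t, ps, hsp⟩ := pv_split_cons f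
  have hin2 : ¬ PySem.Chars.isIn ['_','_'] f.toList = true := by simpa using hin
  simp [pvCollect, hsp, hin2]

theorem pvCollect_skip_ne (k f t : String) (ps seen rest : List String)
    (hsp : PySem.Str.split? f "__" = some (t :: ps))
    (hpt : ¬ (t == k) = true) :
    pvCollect k seen (f :: rest) = pvCollect k seen rest := by
  simp [pvCollect, hsp, hpt]

theorem pvCollect_skip_seen (k f t : String) (ps seen rest : List String)
    (hsp : PySem.Str.split? f "__" = some (t :: ps))
    (hm : PySem.Str.join "__" ps ∈ seen) :
    pvCollect k seen (f :: rest) = pvCollect k seen rest := by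
  simp [pvCollect, hsp, hm]

theorem pvCollect_take (k f t : String) (ps seen rest : List String)
    (hsp : PySem.Str.split? f "__" = some (t :: ps))
    (hin : PySem.Str.isIn "__" f = true)
    (hk : (t == k) = true)
    (hm : PySem.Str.join "__" ps ∉ seen) :
    pvCollect k seen (f :: rest)
      = PySem.Str.join "__" ps :: pvCollect k (seen ++ [PySem.Str.join "__" ps]) rest := by
  have hin2 : PySem.Chars.isIn ['_','_'] f.toList = true := by simpa using hin
  simp [pvCollect, hsp, hk, hm, hin2]

-- A's appends under key k are exactly an ordered-set update by B's per-key inner list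
theorem pv_collect_eq_update (k : String) : ∀ (l : List String) (seen : List String),
    seen ++ pvCollect k seen l = PySem.Set.update seen (pvInner k l) := by
  intro l
  induction l with
  | nil => intro seen; simp [pvCollect, pvInner, PySem.Set.update]
  | cons f rest ih =>
    intro seen
    obtain ⟨t, ps, hsp⟩ := pv_split_cons f
    by_cases hin : PySem.Str.isIn "__" f = true
    · have hin2 : PySem.Chars.isIn ['_','_'] f.toList = true := by simpa using hin
      have hpI : pvInner k (f :: rest) =
          (if (t == k) = true then [PySem.Str.join "__" ps] else []) ++ pvInner k rest := by
        simp only [pvInner, List.filter_cons]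
        have h0 : PySem.List.pyGetD (t::ps) 0 "" = t := by
          simp [PySem.List.pyGetD, PySem.List.pyGet?, PySem.List.pyIdx?]
        have h1 : PySem.List.slice (t::ps) (some 1) none = ps := by
          simp [PySem.List.slice_from]
        by_cases hk : (t == k) = true
        · simp [h0, hk, h1, pvInner, hin2, hsp]
        · simp [h0, hk, pvInner, hin2, hsp]
      by_cases hk : (t == k) = true
      · have hk2 : t = k := by simpa using hk
        subst hk2
        by_cases hmem : PySem.Str.join "__" ps ∈ seen
        · rw [pvCollect_skip_seen t f t ps seen rest hsp hmem, ih, hpI]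
          simp [PySem.Set.update, PySem.Set.add, hmem]
        · rw [pvCollect_take t f t ps seen rest hsp hin hk hmem, hpI]
          have h2 := ih (seen ++ [PySem.Str.join "__" ps])
          have h3 : seen ++ PySem.Str.join "__" ps :: pvCollect t (seen ++ [PySem.Str.join "__" ps]) rest
              = (seen ++ [PySem.Str.join "__" ps]) ++ pvCollect t (seen ++ [PySem.Str.join "__" ps]) rest := by
            simp
          rw [h3, h2]
          simp [PySem.Set.update, PySem.Set.add, hmem]
      · rw [pvCollect_skip_ne k f t ps seen rest hsp hk, ih, hpI]
        simp [hk]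
    · have hin2 : ¬ PySem.Chars.isIn ['_','_'] f.toList = true := by simpa using hin
      have hpI : pvInner k (f :: rest) = pvInner k rest := by
        simp [pvInner, hin2]
      rw [pvCollect_skip_notin k f seen rest hin, ih, hpI]

-- A's second loop, run from any dict with distinct keys, appends pvCollect per entry
theorem pv_loop2_items : ∀ (l : List String) (d : PySem.Dict String (List String)), d.keys.Nodup →
    (l.foldl pvStepA d).items = d.items.map (fun p => (p.1, p.2 ++ pvCollect p.1 p.2 l)) := by
  intro l
  induction l with
  | nil => intro d hn; simp [pvCollect]
  | cons f rest ih =>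
    intro d hn
    obtain ⟨t, ps, hsp⟩ := pv_split_cons f
    simp only [List.foldl_cons]
    by_cases hin : PySem.Str.isIn "__" f = true
    · by_cases hget : (!d.contains t || (d.getD t []).contains (PySem.Str.join "__" ps)) = true
      · have hstep : pvStepA d f = d := by
          unfold pvStepA
          rw [if_pos hin, hsp]
          exact if_pos hget
        rw [hstep, ih d hn]
        apply List.map_congr_left
        rintro ⟨pk, pv⟩ hp
        rcases Bool.or_eq_true_iff.mp hget with hnc | hmem
        · have hpt : ¬ (t == pk) = true := by
            intro h
            have hk1 : pk ∈ d.keys := PySem.Dict.mem_keys_of_mem_items d hp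
            have h1 : d.contains pk = true := (PySem.Dict.contains_iff_mem_keys d pk).mpr hk1
            have hpe : t = pk := by simpa using h
            rw [hpe] at hnc
            simp [h1] at hnc
          rw [pvCollect_skip_ne pk f t ps pv rest hsp hpt]
        · by_cases hpt : (t == pk) = true
          · have hpe : t = pk := by simpa using hpt
            have hv : d.getD pk [] = pv := PySem.Dict.getD_of_mem_items d hp hn []
            rw [hpe, hv] at hmem
            rw [pvCollect_skip_seen pk f t ps pv rest hsp (by simpa using hmem)]
          · rw [pvCollect_skip_ne pk f t ps pv rest hsp hpt]
      · have hget2 : d.contains t = true ∧ (d.getD t []).contains (PySem.Str.join "__" ps) = false := by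
          simp only [Bool.or_eq_true, Bool.not_eq_true', not_or, Bool.not_eq_true] at hget
          exact ⟨by simpa using hget.1, hget.2⟩
        have hct := hget2.1
        have hmem : PySem.Str.join "__" ps ∉ d.getD t [] := by
          intro hm
          rw [List.contains_eq_mem] at hget2
          simp [hm] at hget2
        have hstep : pvStepA d f = d.insert t (d.getD t [] ++ [PySem.Str.join "__" ps]) := by
          unfold pvStepA
          rw [if_pos hin, hsp]
          exact if_neg hget
        have hn2 : (d.insert t (d.getD t [] ++ [PySem.Str.join "__" ps])).keys.Nodup := by
          rw [PySem.Dict.keys_insert_of_contains d _ hct]; exact hn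
        rw [hstep, ih _ hn2]
        rw [PySem.Dict.items_insert_of_contains d _ hct]
        rw [List.map_map]
        apply List.map_congr_left
        rintro ⟨pk, pv⟩ hp
        by_cases hpt : (pk == t) = true
        · have hpe : pk = t := by simpa using hpt
          have hv : d.getD pk [] = pv := PySem.Dict.getD_of_mem_items d hp hn []
          have hms : PySem.Str.join "__" ps ∉ pv := by rw [← hv, hpe]; exact hmem
          have hcol := pvCollect_take pk f t ps pv rest hsp hin (by simp [hpe]) hms
          have hv2 : d.getD t [] = pv := by rw [← hpe]; exact hv
          simp only [Function.comp_apply]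
          rw [if_pos hpt, hcol, hv2, hpe, List.append_assoc, List.singleton_append]
        · have hpt2 : ¬ (t == pk) = true := by
            intro h; apply hpt; rw [beq_iff_eq] at h ⊢; exact h.symm
          have hcol := pvCollect_skip_ne pk f t ps pv rest hsp hpt2
          simp only [Function.comp_apply]
          rw [if_neg hpt, hcol]
    · have hstep : pvStepA d f = d := by unfold pvStepA; rw [if_neg hin]
      rw [hstep, ih d hn]
      apply List.map_congr_left
      rintro ⟨pk, pv⟩ hp
      rw [pvCollect_skip_notin pk f pv rest hin]

-- A's first loop is an insert loop over the fields without '__'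
theorem pv_loop1_filter : ∀ (l : List String) (d : PySem.Dict String (List String)),
    l.foldl (fun d field => if PySem.Str.isIn "__" field then d else d.insert field []) d
      = (l.filter (fun f => !PySem.Str.isIn "__" f)).foldl (fun d f => d.insert f ([] : List String)) d := by
  intro l
  induction l with
  | nil => intro d; rfl
  | cons f rest ih =>
    intro d
    by_cases hin : PySem.Str.isIn "__" f = true
    · simp only [List.foldl_cons, List.filter_cons, hin]
      simp only [Bool.not_true, Bool.false_eq_true, if_false]
      exact ih d
    · have hin0 : PySem.Str.isIn "__" f = false := by simpa using hin
      simp only [List.foldl_cons, List.filter_cons, hin0]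
      simp only [Bool.not_false, if_true]
      exact ih _

theorem pv_loop1_values : ∀ (l : List String) (d : PySem.Dict String (List String)),
    (∀ p ∈ d.items, p.2 = ([] : List String)) →
    ∀ p ∈ (l.foldl (fun d f => d.insert f ([] : List String)) d).items, p.2 = ([] : List String) := by
  intro l
  induction l with
  | nil => intro d h; exact h
  | cons f rest ih =>
    intro d h
    apply ih
    intro p hp
    rcases (PySem.Dict.mem_items_insert d f [] p).mp hp with h1 | h2
    · rw [h1]
    · exact h p h2.1

theorem pv_loop1_items (l : List String) :
    (l.foldl (fun d f => d.insert f ([] : List String)) (PySem.Dict.empty : PySem.Dict String (List String))).items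
      = (PySem.List.dedup l).map (fun k => (k, ([] : List String))) := by
  set D := l.foldl (fun d f => d.insert f ([] : List String)) (PySem.Dict.empty : PySem.Dict String (List String)) with hD
  have hkeys : D.keys = PySem.Set.update (PySem.Dict.empty : PySem.Dict String (List String)).keys l := by
    rw [hD]; exact PySem.Dict.keys_foldl_insert l (fun _ _ => []) _
  rw [PySem.Dict.keys_empty] at hkeys
  have hkeys2 : D.keys = PySem.List.dedup l := by
    rw [hkeys, PySem.List.dedup_eq_ofList]; rfl
  have hnd : D.keys.Nodup := by
    rw [hD]; exact PySem.Dict.nodup_keys_foldl_insert l _ _ PySem.Dict.nodup_keys_empty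
  have hval : ∀ p ∈ D.items, p.2 = ([] : List String) := by
    rw [hD]
    exact pv_loop1_values l _ (by intro p hp; simp [PySem.Dict.empty] at hp)
  rw [PySem.Dict.items_eq_map_keys D hnd [], hkeys2]
  apply List.map_congr_left
  intro k hk
  have hkk : k ∈ D.keys := by rw [hkeys2]; exact hk
  have hkk2 : k ∈ D.items.map (·.1) := by simpa only [PySem.Dict.keys] using hkk
  obtain ⟨p, hp, hpe⟩ := List.mem_map.mp hkk2
  have hg : D.getD k [] = p.2 := by
    have hp2 : (p.1, p.2) ∈ D.items := by simpa using hp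
    rw [← hpe]
    exact PySem.Dict.getD_of_mem_items D hp2 hnd []
  rw [hg, hval p hp]

theorem pv_nodup_keys_loop1 (l : List String) :
    ((l.filter (fun f => !PySem.Str.isIn "__" f)).foldl (fun d f => d.insert f ([] : List String))
        (PySem.Dict.empty : PySem.Dict String (List String))).keys.Nodup :=
  PySem.Dict.nodup_keys_foldl_insert _ _ _ PySem.Dict.nodup_keys_empty

-- ===== VERDICT (by name: the statement is the Claim_ definition above) =====
theorem parse_prefetch_fields_spec : Claim_equal_parse_prefetch_fields := by
  unfold Claim_equal_parse_prefetch_fields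
  intro pf _
  unfold Spec_parse_prefetch_fields parse_prefetch_fields parse_prefetch_fields_alt
  by_cases hnil : pf = []
  · subst hnil; rfl
  · rw [if_neg hnil]
    rw [pv_loop1_filter pf PySem.Dict.empty]
    rw [pv_loop2_items pf _ (pv_nodup_keys_loop1 pf)]
    rw [pv_loop1_items (pf.filter (fun f => !PySem.Str.isIn "__" f))]
    rw [List.map_map]
    apply List.map_congr_left
    intro k hk
    simp only [Function.comp_apply, List.nil_append]
    have h := pv_collect_eq_update k pf []
    simp only [List.nil_append] at h
    rw [h]
    rw [PySem.List.dedup_eq_ofList]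
    rfl
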